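-- pv_equiv track=rewrite | github.com/Evergreenies/algorithms | python_algorithms/daily_coding_problem/01346_nearest_largest_in_arr.py | pre_process_array
-- ===== SOURCE A (Python) =====
-- def pre_process_array(arr: list[int]) -> tuple:
--     length, stack = len(arr), []
--     nearest_left, nearest_right = [-1] * length, [-1] * length
--
--     for index in range(length):
--         while stack and arr[stack[-1]] <= arr[index]:
--             stack.pop()
--
--         if stack:
--             nearest_left[index] = stack[-1]
--
--         stack.append(index)
--
--     stack.clear()
--
--     for index in range(length - 1, -1, -1):
--         while stack and arr[stack[-1]] <= arr[index]:
--             stack.pop()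
--
--         if stack:
--             nearest_right[index] = stack[-1]
--
--         stack.append(index)
--
--     return nearest_left, nearest_right
-- ===== SOURCE B (Python) =====
-- def pre_process_array(arr: list[int]) -> tuple:
--     # Simpler: per-index linear search for the first strictly larger element,
--     # instead of two monotonic-stack passes.
--     n = len(arr)
--
--     def nearest(i, indices):
--         return next((j for j in indices if arr[j] > arr[i]), -1)
--
--     nearest_left = [nearest(i, range(i - 1, -1, -1)) for i in range(n)]
--     nearest_right = [nearest(i, range(i + 1, n)) for i in range(n)]
--     return nearest_left, nearest_right
-- ===== Notes on version B (the rewrite author's own statement) =====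
-- stated objective: simpler
-- what changed: Replaces the two monotonic-stack passes with a direct per-index linear search: for each i, scan outward (left: i-1 down to 0, right: i+1 up to n-1) for the first strictly larger element.
import Mathlib
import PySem

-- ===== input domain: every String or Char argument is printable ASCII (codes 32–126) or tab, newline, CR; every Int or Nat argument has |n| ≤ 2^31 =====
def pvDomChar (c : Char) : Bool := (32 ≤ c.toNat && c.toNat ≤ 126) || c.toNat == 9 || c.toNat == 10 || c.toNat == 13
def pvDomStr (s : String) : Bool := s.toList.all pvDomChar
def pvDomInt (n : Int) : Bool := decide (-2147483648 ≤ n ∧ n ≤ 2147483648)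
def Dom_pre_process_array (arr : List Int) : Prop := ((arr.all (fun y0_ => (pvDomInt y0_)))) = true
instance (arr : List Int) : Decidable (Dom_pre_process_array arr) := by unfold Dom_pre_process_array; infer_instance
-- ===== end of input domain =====

-- B replaces the two monotonic-stack passes with a direct per-index linear search
-- for the first strictly larger element (simpler, no stack state).

-- ===== PORT A =====
-- arr[j] for an index j known to be in range (indices produced by range()/the stack are always valid)
def ppaAt (arr : List Int) (j : Int) : Int := PySem.List.pyGetD arr j 0

-- one iteration of either for-loop of A: pop while arr[stack[-1]] <= arr[index],
-- read stack[-1] (or keep -1), push index; state = (values emitted so far, stack with top first)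
def ppaStep (arr : List Int) (acc : List Int × List Int) (i : Int) : List Int × List Int :=
  let st := acc.2.dropWhile (fun j => decide (ppaAt arr j ≤ ppaAt arr i))
  (acc.1 ++ [st.head?.getD (-1)], i :: st)

def pre_process_array (arr : List Int) : List Int × List Int :=
  (((PySem.List.pyRange 0 (arr.length : Int) 1).foldl (ppaStep arr) ([], [])).1,
   ((PySem.List.pyRange ((arr.length : Int) - 1) (-1) (-1)).foldl (ppaStep arr) ([], [])).1.reverse)

-- ===== PORT B =====
-- next((j for j in indices if arr[j] > arr[i]), -1)
def nearestIdx (arr : List Int) (i : Int) (indices : List Int) : Int :=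
  (indices.find? (fun j => decide (ppaAt arr i < ppaAt arr j))).getD (-1)

def pre_process_array_alt (arr : List Int) : List Int × List Int :=
  ((PySem.List.pyRange 0 (arr.length : Int) 1).map
      (fun i => nearestIdx arr i (PySem.List.pyRange (i - 1) (-1) (-1))),
   (PySem.List.pyRange 0 (arr.length : Int) 1).map
      (fun i => nearestIdx arr i (PySem.List.pyRange (i + 1) (arr.length : Int) 1)))

-- ===== PRECONDITION & SPEC =====
def Spec_pre_process_array (arr : List Int) (out : List Int × List Int) : Prop := out = pre_process_array_alt arr
instance (arr : List Int) (out : List Int × List Int) : Decidable (Spec_pre_process_array arr out) := by unfold Spec_pre_process_array; infer_instance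

-- ===== CLAIM (what is proved, stated in full; the proofs are below) =====
def Claim_equal_pre_process_array : Prop := ∀ (arr : List Int), Dom_pre_process_array arr → Spec_pre_process_array arr (pre_process_array arr)

-- ===== LEMMAS AND PROOFS =====

-- the value A emits for index i when the indices seen so far (most recent first) are R
def ppaEmit (arr : List Int) (R : List Int) (i : Int) : Int :=
  ((R.dropWhile (fun j => decide (ppaAt arr j ≤ ppaAt arr i))).head?).getD (-1)

-- A's per-step outputs, written against the full seen-so-far list R instead of the stack
def ppaGo (arr : List Int) : List Int → List Int → List Int
  | _, [] => []
  | R, i :: L => ppaEmit arr R i :: ppaGo arr (i :: R) L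

-- the stack and the full seen-list agree on every "first element above threshold" query
def EqFind (arr : List Int) (st R : List Int) : Prop :=
  ∀ t : Int, (st.dropWhile (fun j => decide (ppaAt arr j ≤ t))).head?
           = (R.dropWhile (fun j => decide (ppaAt arr j ≤ t))).head?

lemma dropWhile_le_le (f : Int → Int) (a t : Int) (h : a ≤ t) (l : List Int) :
    (l.dropWhile (fun j => decide (f j ≤ a))).dropWhile (fun j => decide (f j ≤ t))
    = l.dropWhile (fun j => decide (f j ≤ t)) := by
  induction l with
  | nil => simp
  | cons x xs ih =>
    by_cases hx : f x ≤ a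
    · rw [List.dropWhile_cons_of_pos (by simpa using hx), ih,
        List.dropWhile_cons_of_pos (by simpa using le_trans hx h)]
    · rw [List.dropWhile_cons_of_neg (by simpa using hx)]

lemma EqFind_nil (arr : List Int) : EqFind arr [] [] := fun _ => rfl

lemma EqFind_step (arr : List Int) (st R : List Int) (i : Int) (h : EqFind arr st R) :
    EqFind arr (i :: st.dropWhile (fun j => decide (ppaAt arr j ≤ ppaAt arr i))) (i :: R) := by
  intro t
  by_cases hc : ppaAt arr i ≤ t
  · rw [List.dropWhile_cons_of_pos (by simpa using hc),
      List.dropWhile_cons_of_pos (by simpa using hc),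
      dropWhile_le_le (ppaAt arr) (ppaAt arr i) t hc st]
    exact h t
  · rw [List.dropWhile_cons_of_neg (by simpa using hc),
      List.dropWhile_cons_of_neg (by simpa using hc)]
    rfl

lemma foldl_eq_go (arr : List Int) (L : List Int) : ∀ (R st acc : List Int),
    EqFind arr st R →
    (L.foldl (ppaStep arr) (acc, st)).1 = acc ++ ppaGo arr R L := by
  induction L with
  | nil => intro R st acc _; simp [ppaGo]
  | cons i L ih =>
    intro R st acc h
    have hstep : ppaStep arr (acc, st) i
        = (acc ++ [(st.dropWhile (fun j => decide (ppaAt arr j ≤ ppaAt arr i))).head?.getD (-1)],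
           i :: st.dropWhile (fun j => decide (ppaAt arr j ≤ ppaAt arr i))) := rfl
    rw [List.foldl_cons, hstep, ih (i :: R) _ _ (EqFind_step arr st R i h)]
    have hv : (st.dropWhile (fun j => decide (ppaAt arr j ≤ ppaAt arr i))).head?
        = (R.dropWhile (fun j => decide (ppaAt arr j ≤ ppaAt arr i))).head? := h (ppaAt arr i)
    simp [ppaGo, ppaEmit, hv]

lemma emit_eq_nearest (arr : List Int) (i : Int) (R : List Int) :
    ppaEmit arr R i = nearestIdx arr i R := by
  unfold nearestIdx ppaEmit
  rw [List.find?_eq_head?_dropWhile_not]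
  have hp : (fun x => !decide (ppaAt arr i < ppaAt arr x))
      = (fun j => decide (ppaAt arr j ≤ ppaAt arr i)) := by
    funext j
    rw [← decide_not]
    simp [not_lt]
  rw [hp]

lemma go_left (arr : List Int) (k : Nat) : ∀ a : Int, 0 ≤ a →
    ppaGo arr (PySem.List.pyRange (a - 1) (-1) (-1)) (PySem.List.pyRange a (a + k) 1)
    = (PySem.List.pyRange a (a + k) 1).map
        (fun i => nearestIdx arr i (PySem.List.pyRange (i - 1) (-1) (-1))) := by
  induction k with
  | zero => intro a _; simp [ppaGo]
  | succ k ih =>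
    intro a ha
    rw [PySem.List.pyRange_one_cons (by push_cast; omega : a < a + ((k+1 : Nat) : Int))]
    have hR : (a : Int) :: PySem.List.pyRange (a - 1) (-1) (-1)
        = PySem.List.pyRange ((a + 1) - 1) (-1) (-1) := by
      rw [show a + 1 - 1 = a by ring, PySem.List.pyRange_neg_one_cons (by omega : (-1:Int) < a)]
    have harg : a + ((k+1 : Nat) : Int) = (a + 1) + (k : Int) := by push_cast; ring
    rw [List.map_cons, ppaGo, hR, harg, ih (a + 1) (by omega), emit_eq_nearest]

lemma go_right (arr : List Int) (n : Int) (k : Nat) : ∀ a : Int, a = -1 + k → a < n →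
    ppaGo arr (PySem.List.pyRange (a + 1) n 1) (PySem.List.pyRange a (-1) (-1))
    = (PySem.List.pyRange a (-1) (-1)).map
        (fun i => nearestIdx arr i (PySem.List.pyRange (i + 1) n 1)) := by
  induction k with
  | zero => intro a ha _; simp [ha, ppaGo]
  | succ k ih =>
    intro a ha hn
    rw [PySem.List.pyRange_neg_one_cons (by omega : (-1:Int) < a)]
    have hR : (a : Int) :: PySem.List.pyRange (a + 1) n 1
        = PySem.List.pyRange ((a - 1) + 1) n 1 := by
      rw [show a - 1 + 1 = a by ring, PySem.List.pyRange_one_cons hn]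
    rw [List.map_cons, ppaGo, hR, ih (a - 1) (by push_cast at ha ⊢; omega) (by omega),
      emit_eq_nearest]

-- ===== VERDICT (by name: the statement is the Claim_ definition above) =====
theorem pre_process_array_spec : Claim_equal_pre_process_array := by
  intro arr _
  unfold Spec_pre_process_array pre_process_array pre_process_array_alt
  have hlen : (arr.length : Int) = 0 + (arr.length : Int) := by ring
  rw [Prod.mk.injEq]
  refine ⟨?_, ?_⟩
  ·
    -- left pass
    rw [foldl_eq_go arr _ (PySem.List.pyRange (0 - 1) (-1) (-1)) [] []
        (by rw [PySem.List.pyRange_neg_one_eq_nil (by omega)]; exact EqFind_nil arr)]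
    rw [hlen, go_left arr arr.length 0 le_rfl]
    simp
  ·  -- right pass
    rcases Nat.eq_zero_or_pos arr.length with h0 | hpos
    · simp [h0, PySem.List.pyRange_one_eq_nil (by omega : (0:Int) ≤ 0)]
    · rw [foldl_eq_go arr _ (PySem.List.pyRange ((arr.length : Int) - 1 + 1) (arr.length) 1) [] []
          (by rw [show (arr.length : Int) - 1 + 1 = (arr.length : Int) by ring,
                PySem.List.pyRange_one_eq_nil le_rfl]; exact EqFind_nil arr)]
      rw [go_right arr (arr.length : Int) arr.length
          ((arr.length : Int) - 1) (by ring) (by omega)]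
      rw [List.nil_append, ← List.map_reverse,
        PySem.List.pyRange_neg_one_eq_reverse, List.reverse_reverse]
      norm_num
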